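-- pv_equiv track=rewrite | github.com/linhdvu14/cp-sols | sols/CodeForces/1658_d2/D1_388535_Easy_Version_.py | solve
-- ===== SOURCE A (Python) =====
-- def solve(L, R, A):
--     if (R - L + 1) % 2 == 1:
--         res = 0
--         for i, a in enumerate(A):
--             res ^= a
--             res ^= i
--         return res
--
--     cnt_i = [0] * 18
--     cnt_a = [0] * 18
--     for i, a in enumerate(A):
--         for b in range(18):
--             if (i >> b) & 1 == 1: cnt_i[b] += 1
--             if (a >> b) & 1 == 1: cnt_a[b] += 1
--
--     res = 0
--     for b in range(18):
--         res <<= 1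
--         if cnt_i[17-b] != cnt_a[17-b]:
--             res |= 1
--     return res
-- ===== SOURCE B (Python) =====
-- def _xor_upto(n):
--     # XOR of 0, 1, ..., n-1 via the period-4 pattern (no loop over indices).
--     m = (n - 1) % 4
--     return (n - 1) if m == 0 else 1 if m == 1 else n if m == 2 else 0
--
--
-- def solve(L, R, A):
--     n = len(A)
--     if (R - L + 1) % 2 == 1:
--         xor_a = 0
--         for a in A:
--             xor_a ^= a
--         return xor_a ^ _xor_upto(n)
--     res = 0
--     for b in range(17, -1, -1):
--         p = 1 << b
--         idx_cnt = (n >> (b + 1)) * p + max(0, n % (2 * p) - p)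
--         a_cnt = sum((a >> b) & 1 for a in A)
--         if idx_cnt != a_cnt:
--             res += p
--     return res
-- ===== Notes on version B (the rewrite author's own statement) =====
-- stated objective: faster
-- what changed: B never scans the index range: the odd branch XORs the array once and gets the XOR of 0..n-1 from the period-4 closed form, and the even branch replaces A's per-index-per-bit counting (with two 18-entry tables updated 36 times per element) by a closed-form count of indices below n with bit b set plus one per-bit sum over the array, assembling the result by adding powers of two instead of shift-or.
import Mathlib
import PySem

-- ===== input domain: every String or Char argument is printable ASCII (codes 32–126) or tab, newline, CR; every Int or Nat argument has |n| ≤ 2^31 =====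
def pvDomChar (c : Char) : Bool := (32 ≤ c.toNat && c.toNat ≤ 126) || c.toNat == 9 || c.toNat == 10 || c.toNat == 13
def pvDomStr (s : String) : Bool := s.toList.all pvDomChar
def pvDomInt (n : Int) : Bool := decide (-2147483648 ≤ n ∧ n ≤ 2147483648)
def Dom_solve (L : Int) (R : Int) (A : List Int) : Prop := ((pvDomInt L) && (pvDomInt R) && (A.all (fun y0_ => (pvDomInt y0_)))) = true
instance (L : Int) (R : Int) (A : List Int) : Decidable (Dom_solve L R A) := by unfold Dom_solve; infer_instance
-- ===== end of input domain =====

-- B replaces every scan of the index range by closed forms (period-4 XOR pattern, per-bit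
-- closed-form index count) and assembles the even-case answer by adding powers of two.

-- ===== PORT A =====
-- inner 'for b in range(18)' body: cnt_i[b] += 1 / cnt_a[b] += 1 when bit b of i / a is set
def stepBit (i a : Int) (c : List Int × List Int) (b : Int) : List Int × List Int :=
  let ci := if PySem.Int.band (i >>> b.toNat) 1 = 1
            then PySem.List.pySetD c.1 b (PySem.List.pyGetD c.1 b 0 + 1) else c.1
  let ca := if PySem.Int.band ((a : Int) >>> (b.toNat : Nat)) 1 = 1
            then PySem.List.pySetD c.2 b (PySem.List.pyGetD c.2 b 0 + 1) else c.2
  (ci, ca)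

-- body of 'for i, a in enumerate(A)'
def stepElem (c : List Int × List Int) (ia : Int × Int) : List Int × List Int :=
  (PySem.List.pyRange 0 18 1).foldl (stepBit ia.1 ia.2) c

-- body of the final 'for b in range(18)': res <<= 1; res |= 1 if counts differ
def finStep (cnt : List Int × List Int) (res : Int) (b : Int) : Int :=
  let res := res <<< (1 : Nat)
  if PySem.List.pyGetD cnt.1 (17 - b) 0 ≠ PySem.List.pyGetD cnt.2 (17 - b) 0
  then PySem.Int.bor res 1 else res

def solve (L : Int) (R : Int) (A : List Int) : Int :=
  if PySem.Int.mod (R - L + 1) 2 = 1 then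
    (PySem.List.enumerate A 0).foldl
      (fun res ia => PySem.Int.bxor (PySem.Int.bxor res ia.2) ia.1) 0
  else
    let cnt := (PySem.List.enumerate A 0).foldl stepElem
      (List.replicate 18 (0 : Int), List.replicate 18 (0 : Int))
    (PySem.List.pyRange 0 18 1).foldl (finStep cnt) 0

-- ===== PORT B =====
-- XOR of 0, 1, ..., n-1 via the period-4 pattern
def xorUpto (n : Int) : Int :=
  let m := PySem.Int.mod (n - 1) 4
  if m = 0 then n - 1 else if m = 1 then 1 else if m = 2 then n else 0

def solve_alt (L : Int) (R : Int) (A : List Int) : Int :=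
  let n : Int := A.length
  if PySem.Int.mod (R - L + 1) 2 = 1 then
    let xorA := A.foldl (fun x a => PySem.Int.bxor x a) 0
    PySem.Int.bxor xorA (xorUpto n)
  else
    (PySem.List.pyRange 17 (-1) (-1)).foldl
      (fun res b =>
        let p : Int := 1 <<< b.toNat
        let idxCnt := (n >>> ((b.toNat + 1 : Nat))) * p + max 0 (PySem.Int.mod n (2 * p) - p)
        let aCnt := (A.map (fun a => PySem.Int.band ((a : Int) >>> (b.toNat : Nat)) 1)).sum
        if idxCnt ≠ aCnt then res + p else res) 0

-- ===== PRECONDITION & SPEC =====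
def Spec_solve (L : Int) (R : Int) (A : List Int) (out : Int) : Prop := out = solve_alt L R A
instance (L : Int) (R : Int) (A : List Int) (out : Int) : Decidable (Spec_solve L R A out) := by unfold Spec_solve; infer_instance

-- ===== CLAIM (what is proved, stated in full; the proofs are below) =====
def Claim_equal_solve : Prop := ∀ (L : Int) (R : Int) (A : List Int), Dom_solve L R A → Spec_solve L R A (solve L R A)

-- ===== LEMMAS AND PROOFS =====

-- ---- generic facts about Python XOR (PySem.Int.bxor) ----

-- sign/magnitude encoding: bxor acts componentwise (Bool xor on the sign, Nat xor on the magnitude)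
def benc (a : Int) : Bool × Nat := (decide (a < 0), if a < 0 then (-a - 1).toNat else a.toNat)
def bdec (p : Bool × Nat) : Int := if p.1 then -(p.2 : Int) - 1 else (p.2 : Int)

theorem benc_bdec (p : Bool × Nat) : benc (bdec p) = p := by
  obtain ⟨s, m⟩ := p
  cases s <;> simp [benc, bdec] <;> omega

theorem bxor_enc (a b : Int) :
    PySem.Int.bxor a b = bdec (xor (benc a).1 (benc b).1, (benc a).2 ^^^ (benc b).2) := by
  simp only [PySem.Int.bxor, benc, bdec]
  split_ifs with h1 h2 h3 h4 h5 h6 h7 <;> simp_all <;> omega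

theorem bxor_assoc (a b c : Int) :
    PySem.Int.bxor (PySem.Int.bxor a b) c = PySem.Int.bxor a (PySem.Int.bxor b c) := by
  rw [bxor_enc a b, bxor_enc b c, bxor_enc _ c, bxor_enc a, benc_bdec, benc_bdec]
  simp [Nat.xor_assoc]

theorem zero_bxor (a : Int) : PySem.Int.bxor 0 a = a := by
  rw [PySem.Int.bxor_comm]; exact PySem.Int.bxor_zero a

theorem bxor_left_comm (a b c : Int) :
    PySem.Int.bxor a (PySem.Int.bxor b c) = PySem.Int.bxor b (PySem.Int.bxor a c) := by
  rw [← bxor_assoc, PySem.Int.bxor_comm a b, bxor_assoc]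

theorem bxor_cancel (a b : Int) : PySem.Int.bxor a (PySem.Int.bxor a b) = b := by
  rw [← bxor_assoc, PySem.Int.bxor_self, zero_bxor]

-- ---- odd branch ----

theorem two_mul_xor_one (k : Nat) : (2 * k) ^^^ 1 = 2 * k + 1 := by
  apply Nat.eq_of_testBit_eq; intro i
  cases i with
  | zero => simp
  | succ j => simp [Nat.testBit_succ, Nat.mul_add_div]

theorem two_mul_xor_succ (k : Nat) : (2 * k) ^^^ (2 * k + 1) = 1 := by
  rw [← two_mul_xor_one, ← Nat.xor_assoc, Nat.xor_self, Nat.zero_xor]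

theorem xorUpto_succ (s : Int) (hs : 0 ≤ s) :
    xorUpto (s + 1) = PySem.Int.bxor (xorUpto s) s := by
  obtain ⟨t, rfl⟩ := Int.eq_ofNat_of_zero_le hs
  match t with
  | 0 => decide
  | u + 1 =>
    have hm1 : PySem.Int.mod ((((u + 1 : Nat) : Int)) + 1 - 1) 4 = (((u + 1) % 4 : Nat) : Int) := by
      rw [PySem.Int.mod_eq_emod_of_pos (by norm_num)]; omega
    have hm2 : PySem.Int.mod ((((u + 1 : Nat) : Int)) - 1) 4 = ((u % 4 : Nat) : Int) := by
      rw [PySem.Int.mod_eq_emod_of_pos (by norm_num)]; omega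
    have h4 : u % 4 = 0 ∨ u % 4 = 1 ∨ u % 4 = 2 ∨ u % 4 = 3 := by omega
    unfold xorUpto
    rw [hm1, hm2]
    rcases h4 with h | h | h | h
    · -- t % 4 = 1 : LHS 1, RHS (t-1) ^ t with t-1 even
      have h1 : (u + 1) % 4 = 1 := by omega
      have hcast : (((u + 1 : Nat) : Int)) - 1 = ((u : Nat) : Int) := by omega
      rw [h, h1]
      norm_num
      have hval : u ^^^ (u + 1) = 1 := by
        have hu : u = 2 * (u / 2) := by omega
        have h2 := two_mul_xor_succ (u / 2)
        rw [← hu] at h2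
        exact h2
      rw [show ((u : Int) + 1) = (((u + 1 : Nat)) : Int) by push_cast; ring,
        PySem.Int.bxor_natCast, hval]
      norm_num
    · -- t % 4 = 2 : LHS t + 1, RHS 1 ^ t with t even
      have h1 : (u + 1) % 4 = 2 := by omega
      rw [h, h1]
      norm_num
      have hval : 1 ^^^ (u + 1) = u + 2 := by
        have hu : u + 1 = 2 * ((u + 1) / 2) := by omega
        rw [Nat.xor_comm, hu, two_mul_xor_one]
        omega
      rw [show ((u : Int) + 1) = (((u + 1 : Nat)) : Int) by push_cast; ring,
        show (1 : Int) = ((1 : Nat) : Int) from rfl, PySem.Int.bxor_natCast, hval]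
      push_cast
      ring
    · -- t % 4 = 3 : LHS 0, RHS t ^ t
      have h1 : (u + 1) % 4 = 3 := by omega
      rw [h, h1]
      norm_num [PySem.Int.bxor_self]
    · -- t % 4 = 0 : LHS t, RHS 0 ^ t
      have h1 : (u + 1) % 4 = 0 := by omega
      rw [h, h1]
      norm_num [zero_bxor]

-- xorN k s = s ^ (s+1) ^ ... ^ (s+k-1)
def xorN : Nat → Int → Int
  | 0, _ => 0
  | k + 1, s => PySem.Int.bxor s (xorN k (s + 1))

theorem foldl_bxor_shift (A : List Int) (r : Int) :
    A.foldl (fun x a => PySem.Int.bxor x a) r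
      = PySem.Int.bxor r (A.foldl (fun x a => PySem.Int.bxor x a) 0) := by
  induction A generalizing r with
  | nil => simp [PySem.Int.bxor_zero]
  | cons a t ih =>
    simp only [List.foldl_cons]
    rw [ih (PySem.Int.bxor r a), ih (PySem.Int.bxor 0 a), zero_bxor, bxor_assoc]

theorem enum_fold_bxor (A : List Int) (s res : Int) :
    (PySem.List.enumerate A s).foldl
        (fun res ia => PySem.Int.bxor (PySem.Int.bxor res ia.2) ia.1) res
      = PySem.Int.bxor (PySem.Int.bxor res (A.foldl (fun x a => PySem.Int.bxor x a) 0))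
          (xorN A.length s) := by
  induction A generalizing s res with
  | nil => simp [xorN, PySem.Int.bxor_zero]
  | cons a t ih =>
    rw [PySem.List.enumerate_cons]
    simp only [List.foldl_cons, List.length_cons, xorN]
    rw [ih, foldl_bxor_shift t (PySem.Int.bxor 0 a), zero_bxor]
    simp [bxor_left_comm, PySem.Int.bxor_comm]

theorem xorN_eq (k : Nat) : ∀ s : Nat, xorN k (s : Int)
    = PySem.Int.bxor (xorUpto ((s : Int) + (k : Int))) (xorUpto (s : Int)) := by
  induction k with
  | zero => intro s; simp [xorN, PySem.Int.bxor_self]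
  | succ k ih =>
    intro s
    have hcast : ((s : Int)) + 1 = (((s + 1 : Nat)) : Int) := by omega
    simp only [xorN, hcast, ih (s + 1)]
    rw [show ((((s + 1 : Nat)) : Int)) = (s : Int) + 1 by omega,
      xorUpto_succ (s : Int) (by positivity)]
    rw [show ((s : Int)) + 1 + (k : Int) = (s : Int) + ((k + 1 : Nat) : Int) by push_cast; ring]
    simp [bxor_left_comm, PySem.Int.bxor_comm, bxor_cancel]

theorem odd_branch (A : List Int) :
    (PySem.List.enumerate A 0).foldl
        (fun res ia => PySem.Int.bxor (PySem.Int.bxor res ia.2) ia.1) 0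
      = PySem.Int.bxor (A.foldl (fun x a => PySem.Int.bxor x a) 0) (xorUpto (A.length : Int)) := by
  have hx := xorN_eq A.length 0
  norm_num at hx
  rw [enum_fold_bxor, zero_bxor, hx]
  have h0 : xorUpto 0 = 0 := by decide
  rw [h0, PySem.Int.bxor_zero]

-- ---- even branch ----

-- bit b of the Nat n
def nbit (n b : Nat) : Nat := n / 2 ^ b % 2

-- closed-form count of k < n with bit b set
def cBit (n b : Nat) : Nat := n / 2 ^ (b + 1) * 2 ^ b + (n % 2 ^ (b + 1) - 2 ^ b)

theorem cBit_succ (n b : Nat) : cBit (n + 1) b = cBit n b + nbit n b := by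
  unfold cBit nbit
  have hP : 0 < 2 ^ b := Nat.two_pow_pos b
  have hQ : 2 ^ (b + 1) = 2 * 2 ^ b := by rw [pow_succ]; ring
  rw [hQ]
  have h1 := Nat.div_add_mod n (2 * 2 ^ b)
  have hr : n % (2 * 2 ^ b) < 2 * 2 ^ b := Nat.mod_lt _ (by omega)
  have hnp : n / 2 ^ b = 2 * (n / (2 * 2 ^ b)) + n % (2 * 2 ^ b) / 2 ^ b := by
    conv_lhs => rw [← h1]
    rw [show 2 * 2 ^ b * (n / (2 * 2 ^ b)) + n % (2 * 2 ^ b)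
          = n % (2 * 2 ^ b) + 2 ^ b * (2 * (n / (2 * 2 ^ b))) by ring,
      Nat.add_mul_div_left _ _ hP, Nat.add_comm]
  have hrp : n % (2 * 2 ^ b) / 2 ^ b = if 2 ^ b ≤ n % (2 * 2 ^ b) then 1 else 0 := by
    split_ifs with h
    · exact Nat.div_eq_of_lt_le (by omega) (by omega)
    · exact Nat.div_eq_of_lt (by omega)
  have hbit : n / 2 ^ b % 2 = if 2 ^ b ≤ n % (2 * 2 ^ b) then 1 else 0 := by
    rw [hnp, hrp]; split_ifs <;> omega
  by_cases hc : n % (2 * 2 ^ b) + 1 < 2 * 2 ^ b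
  · have hsplit : n + 1 = n % (2 * 2 ^ b) + 1 + 2 * 2 ^ b * (n / (2 * 2 ^ b)) := by
      conv_lhs => rw [← h1]
      ring
    have hd : (n + 1) / (2 * 2 ^ b) = n / (2 * 2 ^ b) := by
      rw [hsplit, Nat.add_mul_div_left _ _ (by omega : 0 < 2 * 2 ^ b),
        Nat.div_eq_of_lt hc, Nat.zero_add]
    have hm : (n + 1) % (2 * 2 ^ b) = n % (2 * 2 ^ b) + 1 := by
      rw [hsplit, Nat.add_mul_mod_self_left, Nat.mod_eq_of_lt hc]
    rw [hd, hm, hbit, Nat.add_assoc]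
    exact congrArg (n / (2 * 2 ^ b) * 2 ^ b + ·) (by split_ifs <;> omega)
  · have hsplit : n + 1 = 2 * 2 ^ b * (n / (2 * 2 ^ b) + 1) := by
      have h2 : n + 1 = 2 * 2 ^ b * (n / (2 * 2 ^ b)) + (n % (2 * 2 ^ b) + 1) := by
        conv_lhs => rw [← h1]
        ring
      rw [h2, show n % (2 * 2 ^ b) + 1 = 2 * 2 ^ b by omega]
      ring
    have hd : (n + 1) / (2 * 2 ^ b) = n / (2 * 2 ^ b) + 1 := by
      rw [hsplit, Nat.mul_div_cancel_left _ (by omega : 0 < 2 * 2 ^ b)]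
    have hm : (n + 1) % (2 * 2 ^ b) = 0 := by
      rw [hsplit, Nat.mul_mod_right]
    have hmul : (n / (2 * 2 ^ b) + 1) * 2 ^ b = n / (2 * 2 ^ b) * 2 ^ b + 2 ^ b := by ring
    rw [hd, hm, hbit, if_pos (by omega : 2 ^ b ≤ n % (2 * 2 ^ b)), hmul]
    generalize n / (2 * 2 ^ b) * 2 ^ b = Q
    omega

theorem sum_nbit (n b : Nat) :
    ((List.range n).map fun k => (nbit k b : Int)).sum = (cBit n b : Int) := by
  induction n with
  | zero => simp [cBit]
  | succ m ih =>
    rw [List.range_succ, List.map_append, List.sum_append, ih, cBit_succ]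
    push_cast
    simp

theorem band_one_cases (x : Int) : PySem.Int.band x 1 = 0 ∨ PySem.Int.band x 1 = 1 := by
  rw [PySem.Int.band_one]
  have h1 := PySem.Int.mod_nonneg x (by norm_num : (0:Int) < 2)
  have h2 := PySem.Int.mod_lt x (by norm_num : (0:Int) < 2)
  omega

theorem band_shift_natCast (m b : Nat) :
    PySem.Int.band ((m : Int) >>> b) 1 = (nbit m b : Int) := by
  have h1 : ((m : Int)) >>> b = ((m >>> b : Nat) : Int) := by
    simp [Int.shiftRight_eq_div_pow, Nat.shiftRight_eq_div_pow]
  rw [h1, show (1 : Int) = ((1 : Nat) : Int) from rfl, PySem.Int.band_natCast,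
    Nat.and_one_is_mod, Nat.shiftRight_eq_div_pow]
  rfl

-- counting invariant of the inner bit loop, for the prefix range(K)
theorem inner_loop (i a : Int) (K : Nat) (hK : K ≤ 18) (c : List Int × List Int)
    (h1 : c.1.length = 18) (h2 : c.2.length = 18) :
    ((PySem.List.pyRange 0 (K : Int) 1).foldl (stepBit i a) c).1.length = 18 ∧
    ((PySem.List.pyRange 0 (K : Int) 1).foldl (stepBit i a) c).2.length = 18 ∧
    ∀ b : Nat, b < 18 →
      (PySem.List.pyGetD ((PySem.List.pyRange 0 (K : Int) 1).foldl (stepBit i a) c).1 (b : Int) 0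
        = PySem.List.pyGetD c.1 (b : Int) 0
          + (if b < K then PySem.Int.band (i >>> b) 1 else 0)) ∧
      (PySem.List.pyGetD ((PySem.List.pyRange 0 (K : Int) 1).foldl (stepBit i a) c).2 (b : Int) 0
        = PySem.List.pyGetD c.2 (b : Int) 0
          + (if b < K then PySem.Int.band (a >>> b) 1 else 0)) := by
  induction K with
  | zero =>
    rw [show (((0 : Nat)) : Int) = 0 from rfl, PySem.List.pyRange_one_eq_nil (le_refl 0)]
    simp [h1, h2]
  | succ K ih =>
    have hK' : K ≤ 18 := by omega
    have hKlt : K < 18 := by omega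
    obtain ⟨ih1, ih2, ih3⟩ := ih hK'
    have hsplit : PySem.List.pyRange 0 (((K + 1 : Nat)) : Int) 1
        = PySem.List.pyRange 0 ((K : Nat) : Int) 1 ++ [((K : Nat) : Int)] := by
      rw [show (((K + 1 : Nat)) : Int) = ((K : Nat) : Int) + 1 by push_cast; ring]
      exact PySem.List.pyRange_one_succ_right (Int.natCast_nonneg K)
    rw [hsplit, List.foldl_append]
    simp only [List.foldl_cons, List.foldl_nil]
    set r := (PySem.List.pyRange 0 ((K : Nat) : Int) 1).foldl (stepBit i a) c with hr
    have hc1 : (stepBit i a r ((K : Nat) : Int)).1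
        = if PySem.Int.band (i >>> K) 1 = 1
          then PySem.List.pySetD r.1 ((K : Nat) : Int) (PySem.List.pyGetD r.1 ((K : Nat) : Int) 0 + 1)
          else r.1 := by
      simp [stepBit]
    have hc2 : (stepBit i a r ((K : Nat) : Int)).2
        = if PySem.Int.band (a >>> K) 1 = 1
          then PySem.List.pySetD r.2 ((K : Nat) : Int) (PySem.List.pyGetD r.2 ((K : Nat) : Int) 0 + 1)
          else r.2 := by
      simp [stepBit]
    have hlen1 : (stepBit i a r ((K : Nat) : Int)).1.length = 18 := by
      rw [hc1]; split_ifs <;> simp [ih1]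
    have hlen2 : (stepBit i a r ((K : Nat) : Int)).2.length = 18 := by
      rw [hc2]; split_ifs <;> simp [ih2]
    refine ⟨hlen1, hlen2, fun b hb => ?_⟩
    obtain ⟨ihb1, ihb2⟩ := ih3 b hb
    constructor
    · rw [hc1]
      rcases band_one_cases (i >>> K) with h | h
      · rw [if_neg (by rw [h]; norm_num), ihb1]
        by_cases hbe : b = K
        · subst hbe
          rw [h]
          split_ifs <;> omega
        · split_ifs <;> omega
      · rw [if_pos h, PySem.List.pyGetD_pySetD_natCast r.1 K b _ 0 (by omega : K < r.1.length)]
        by_cases hbe : b = K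
        · subst hbe
          simp only [ihb1, h]
          split_ifs <;> omega
        · rw [if_neg hbe, ihb1]
          split_ifs <;> omega
    · rw [hc2]
      rcases band_one_cases (a >>> K) with h | h
      · rw [if_neg (by rw [h]; norm_num), ihb2]
        by_cases hbe : b = K
        · subst hbe
          rw [h]
          split_ifs <;> omega
        · split_ifs <;> omega
      · rw [if_pos h, PySem.List.pyGetD_pySetD_natCast r.2 K b _ 0 (by omega : K < r.2.length)]
        by_cases hbe : b = K
        · subst hbe
          simp only [ihb2, h]
          split_ifs <;> omega
        · rw [if_neg hbe, ihb2]
          split_ifs <;> omega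

-- counting invariant of the outer element loop
theorem outer_loop (A : List Int) : ∀ (s : Nat) (c : List Int × List Int),
    c.1.length = 18 → c.2.length = 18 →
    ((PySem.List.enumerate A (s : Int)).foldl stepElem c).1.length = 18 ∧
    ((PySem.List.enumerate A (s : Int)).foldl stepElem c).2.length = 18 ∧
    ∀ b : Nat, b < 18 →
      (PySem.List.pyGetD ((PySem.List.enumerate A (s : Int)).foldl stepElem c).1 (b : Int) 0
        = PySem.List.pyGetD c.1 (b : Int) 0
          + ((List.range A.length).map fun k => (nbit (s + k) b : Int)).sum) ∧
      (PySem.List.pyGetD ((PySem.List.enumerate A (s : Int)).foldl stepElem c).2 (b : Int) 0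
        = PySem.List.pyGetD c.2 (b : Int) 0
          + (A.map fun a => PySem.Int.band ((a : Int) >>> (b : Nat)) 1).sum) := by
  induction A with
  | nil =>
    intro s c h1 h2
    rw [PySem.List.enumerate_nil]
    exact ⟨h1, h2, fun b hb => ⟨by simp, by simp⟩⟩
  | cons a t ih =>
    intro s c h1 h2
    rw [PySem.List.enumerate_cons]
    simp only [List.foldl_cons]
    have hin := inner_loop ((s : Nat) : Int) a 18 (le_refl 18) c h1 h2
    norm_num at hin
    obtain ⟨hl1, hl2, hptin⟩ := hin
    have hcast : ((s : Nat) : Int) + 1 = (((s + 1 : Nat)) : Int) := by push_cast; ring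
    have hstep : stepElem c (((s : Nat) : Int), a)
        = (PySem.List.pyRange 0 (((18 : Nat)) : Int) 1).foldl (stepBit ((s : Nat) : Int) a) c := by
      simp [stepElem]
    rw [hcast]
    obtain ⟨jl1, jl2, jpt⟩ := ih (s + 1) (stepElem c (((s : Nat) : Int), a))
      (by rw [hstep]; norm_num; exact hl1) (by rw [hstep]; norm_num; exact hl2)
    refine ⟨jl1, jl2, fun b hb => ?_⟩
    obtain ⟨jb1, jb2⟩ := jpt b hb
    obtain ⟨ib1, ib2⟩ := hptin b hb
    have hmap : ((List.range (t.length + 1)).map fun k => (nbit (s + k) b : Int)).sum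
        = (nbit s b : Int) + ((List.range t.length).map fun k => (nbit (s + 1 + k) b : Int)).sum := by
      rw [List.range_succ_eq_map, List.map_cons, List.sum_cons, List.map_map]
      have : ((fun k => (nbit (s + k) b : Int)) ∘ Nat.succ) = fun k => (nbit (s + 1 + k) b : Int) := by
        funext k
        simp only [Function.comp]
        rw [show s + k.succ = s + 1 + k from by omega]
      rw [this, Nat.add_zero]
    constructor
    · rw [List.length_cons, hmap, jb1, hstep]
      norm_num
      rw [ib1, if_pos hb, band_shift_natCast]
      ring
    · rw [List.map_cons, List.sum_cons, jb2, hstep]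
      norm_num
      rw [ib2, if_pos hb]
      ring

theorem bor_double_one (v : Int) (h : 0 ≤ v) : PySem.Int.bor (v * 2) 1 = v * 2 + 1 := by
  rw [PySem.Int.bor_of_nonneg (by omega) (by omega)]
  have hto : (v * 2).toNat = 2 * v.toNat := by omega
  rw [hto]
  have h2 : (2 * v.toNat) ||| 1 = 2 * v.toNat + 1 := by
    apply Nat.eq_of_testBit_eq; intro i
    cases i with
    | zero => simp
    | succ j => simp [Nat.testBit_succ, Nat.or_div_two, Nat.mul_add_div]
  rw [show (1 : Int).toNat = 1 from rfl, h2]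
  omega

theorem sum_map_range_eq (f : Nat → Int) (n : Nat) :
    ((List.range n).map f).sum = ∑ i ∈ Finset.range n, f i := by
  induction n with
  | zero => simp
  | succ m ih => rw [List.range_succ, Finset.sum_range_succ, ← ih]; simp

-- A's final loop
theorem fin_fold (cnt : List Int × List Int) (K : Nat) :
    (PySem.List.pyRange 0 ((K : Nat) : Int) 1).foldl (finStep cnt) 0
      = ∑ b ∈ Finset.range K,
          (if PySem.List.pyGetD cnt.1 (17 - ((b : Nat) : Int)) 0
              ≠ PySem.List.pyGetD cnt.2 (17 - ((b : Nat) : Int)) 0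
           then (2 : Int) ^ (K - 1 - b) else 0) := by
  induction K with
  | zero =>
    rw [show (((0 : Nat)) : Int) = 0 from rfl, PySem.List.pyRange_one_eq_nil (le_refl 0)]
    rw [List.foldl_nil, Finset.range_zero, Finset.sum_empty]
  | succ K ih =>
    have hsplit : PySem.List.pyRange 0 (((K + 1 : Nat)) : Int) 1
        = PySem.List.pyRange 0 ((K : Nat) : Int) 1 ++ [((K : Nat) : Int)] := by
      rw [show (((K + 1 : Nat)) : Int) = ((K : Nat) : Int) + 1 by push_cast; ring]
      exact PySem.List.pyRange_one_succ_right (Int.natCast_nonneg K)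
    rw [hsplit, List.foldl_append]
    simp only [List.foldl_cons, List.foldl_nil]
    rw [ih]
    set S := ∑ b ∈ Finset.range K,
        (if PySem.List.pyGetD cnt.1 (17 - ((b : Nat) : Int)) 0
            ≠ PySem.List.pyGetD cnt.2 (17 - ((b : Nat) : Int)) 0
         then (2 : Int) ^ (K - 1 - b) else 0) with hS
    have hS0 : 0 ≤ S := Finset.sum_nonneg (fun b _ => by split_ifs <;> positivity)
    have hdouble : ∑ b ∈ Finset.range K,
        (if PySem.List.pyGetD cnt.1 (17 - ((b : Nat) : Int)) 0
            ≠ PySem.List.pyGetD cnt.2 (17 - ((b : Nat) : Int)) 0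
         then (2 : Int) ^ (K + 1 - 1 - b) else 0) = 2 * S := by
      rw [hS, Finset.mul_sum]
      refine Finset.sum_congr rfl (fun b hb => ?_)
      have hb' : b < K := Finset.mem_range.mp hb
      split_ifs
      · rw [show K + 1 - 1 - b = (K - 1 - b) + 1 by omega, pow_succ]; ring
      · ring
    rw [Finset.sum_range_succ, hdouble]
    unfold finStep
    rw [Int.shiftLeft_eq, show (2 : Int) ^ (1 : Nat) = 2 by norm_num,
      show K + 1 - 1 - K = 0 by omega, pow_zero]
    split_ifs with hc
    · rw [bor_double_one S hS0]; ring
    · ring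

-- closed form equals the counted value
theorem cBit_closed (n b : Nat) :
    (cBit n b : Int)
      = ((n : Int) >>> (b + 1)) * ((1 : Int) <<< b)
        + max 0 (PySem.Int.mod (n : Int) (2 * ((1 : Int) <<< b)) - (1 : Int) <<< b) := by
  have h1 : ((n : Int)) >>> (b + 1) = ((n / 2 ^ (b + 1) : Nat) : Int) := by
    simp [Int.shiftRight_eq_div_pow]
  have h2 : ((1 : Int)) <<< b = ((2 ^ b : Nat) : Int) := by
    simp [Int.shiftLeft_eq]
  have h3 : PySem.Int.mod (n : Int) (2 * ((1 : Int) <<< b)) = ((n % 2 ^ (b + 1) : Nat) : Int) := by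
    rw [h2, show (2 : Int) * ((2 ^ b : Nat) : Int) = ((2 ^ (b + 1) : Nat) : Int) by
      push_cast [pow_succ]; ring]
    exact PySem.Int.mod_natCast n (2 ^ (b + 1))
  rw [h1, h3, h2]
  unfold cBit
  push_cast
  congr 1
  rw [show ((n : Int)) % 2 ^ (b + 1) = ((n % 2 ^ (b + 1) : Nat) : Int) by push_cast; ring,
    show ((2 : Int) ^ b) = ((2 ^ b : Nat) : Int) by push_cast; ring]
  generalize n % 2 ^ (b + 1) = r
  generalize (2 : Nat) ^ b = P
  omega

theorem even_branch (A : List Int) :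
    (PySem.List.pyRange 0 18 1).foldl
        (finStep ((PySem.List.enumerate A 0).foldl stepElem
          (List.replicate 18 (0 : Int), List.replicate 18 (0 : Int)))) 0
      = (PySem.List.pyRange 17 (-1) (-1)).foldl
          (fun res b =>
            let p : Int := 1 <<< b.toNat
            let idxCnt := ((A.length : Int) >>> ((b.toNat + 1 : Nat))) * p
              + max 0 (PySem.Int.mod (A.length : Int) (2 * p) - p)
            let aCnt := (A.map (fun a => PySem.Int.band ((a : Int) >>> (b.toNat : Nat)) 1)).sum
            if idxCnt ≠ aCnt then res + p else res) 0 := by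
  -- pointwise value of the count pair
  have key : ∀ b : Nat, b < 18 →
      (PySem.List.pyGetD ((PySem.List.enumerate A 0).foldl stepElem
          (List.replicate 18 (0 : Int), List.replicate 18 (0 : Int))).1 ((b : Nat) : Int) 0
        = ((cBit A.length b : Nat) : Int))
      ∧ (PySem.List.pyGetD ((PySem.List.enumerate A 0).foldl stepElem
          (List.replicate 18 (0 : Int), List.replicate 18 (0 : Int))).2 ((b : Nat) : Int) 0
        = (A.map fun a => PySem.Int.band ((a : Int) >>> (b : Nat)) 1).sum) := by
    intro b hb
    have hout := outer_loop A 0 (List.replicate 18 0, List.replicate 18 0) (by simp) (by simp)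
    norm_num at hout
    obtain ⟨-, -, hpt⟩ := hout
    obtain ⟨hp1, hp2⟩ := hpt b hb
    constructor
    · rw [sum_nbit] at hp1
      simpa [PySem.List.pyGetD_natCast, List.getD] using hp1
    · simpa [PySem.List.pyGetD_natCast, List.getD] using hp2
  -- A's side as a sum
  have hfin := fin_fold ((PySem.List.enumerate A 0).foldl stepElem
    (List.replicate 18 (0 : Int), List.replicate 18 (0 : Int))) 18
  rw [show (((18 : Nat)) : Int) = (18 : Int) by norm_num] at hfin
  rw [hfin]
  -- B's side: additive form of the fold
  have hfun : (fun (res b : Int) =>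
        let p : Int := 1 <<< b.toNat
        let idxCnt := ((A.length : Int) >>> ((b.toNat + 1 : Nat))) * p
          + max 0 (PySem.Int.mod (A.length : Int) (2 * p) - p)
        let aCnt := (A.map (fun a => PySem.Int.band ((a : Int) >>> (b.toNat : Nat)) 1)).sum
        if idxCnt ≠ aCnt then res + p else res)
      = fun (res b : Int) => res +
          (if ((A.length : Int) >>> ((b.toNat + 1 : Nat))) * (((1 <<< b.toNat : Nat)) : Int)
              + max (0 : Int) (PySem.Int.mod (A.length : Int) ((2 : Int) * (((1 <<< b.toNat : Nat)) : Int))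
                  - (((1 <<< b.toNat : Nat)) : Int))
              ≠ (A.map (fun a => PySem.Int.band ((a : Int) >>> (b.toNat : Nat)) 1)).sum
           then (((1 <<< b.toNat : Nat)) : Int) else 0) := by
    funext res b
    dsimp only
    split_ifs <;> ring
  rw [hfun, PySem.List.foldl_add,
    show PySem.List.pyRange 17 (-1) (-1) = (PySem.List.pyRange 0 18).reverse by
      rw [PySem.List.pyRange_neg_one_eq_reverse]; norm_num,
    List.map_reverse, List.sum_reverse,
    show PySem.List.pyRange 0 18 = (List.range 18).map (fun (k : Nat) => (k : Int)) by decide,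
    List.map_map, sum_map_range_eq, zero_add]
  -- both are the same bit-sum
  rw [show (∑ b ∈ Finset.range 18,
      (if PySem.List.pyGetD ((PySem.List.enumerate A 0).foldl stepElem
            (List.replicate 18 (0 : Int), List.replicate 18 (0 : Int))).1 (17 - ((b : Nat) : Int)) 0
          ≠ PySem.List.pyGetD ((PySem.List.enumerate A 0).foldl stepElem
            (List.replicate 18 (0 : Int), List.replicate 18 (0 : Int))).2 (17 - ((b : Nat) : Int)) 0
       then (2 : Int) ^ (18 - 1 - b) else 0))
      = ∑ b ∈ Finset.range 18,
        (fun j => if PySem.List.pyGetD ((PySem.List.enumerate A 0).foldl stepElem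
            (List.replicate 18 (0 : Int), List.replicate 18 (0 : Int))).1 ((j : Nat) : Int) 0
          ≠ PySem.List.pyGetD ((PySem.List.enumerate A 0).foldl stepElem
            (List.replicate 18 (0 : Int), List.replicate 18 (0 : Int))).2 ((j : Nat) : Int) 0
         then (2 : Int) ^ j else 0) (18 - 1 - b)
      from Finset.sum_congr rfl (fun b hb => by
        have hb2 : b < 18 := Finset.mem_range.mp hb
        have hidx : (17 : Int) - ((b : Nat) : Int) = (((18 - 1 - b : Nat)) : Int) := by omega
        rw [hidx]),
    Finset.sum_range_reflect (fun j => if PySem.List.pyGetD ((PySem.List.enumerate A 0).foldl stepElem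
            (List.replicate 18 (0 : Int), List.replicate 18 (0 : Int))).1 ((j : Nat) : Int) 0
          ≠ PySem.List.pyGetD ((PySem.List.enumerate A 0).foldl stepElem
            (List.replicate 18 (0 : Int), List.replicate 18 (0 : Int))).2 ((j : Nat) : Int) 0
         then (2 : Int) ^ j else 0) 18]
  refine Finset.sum_congr rfl (fun j hj => ?_)
  have hj2 : j < 18 := Finset.mem_range.mp hj
  obtain ⟨k1, k2⟩ := key j hj2
  have hsh : (((1 <<< j : Nat)) : Int) = (1 : Int) <<< j := by
    simp [Int.shiftLeft_eq, Nat.shiftLeft_eq]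
  simp only [Function.comp_apply]
  rw [k1, k2, Int.toNat_natCast, hsh, ← cBit_closed A.length j]
  split_ifs <;> simp [Int.shiftLeft_eq]

-- ===== VERDICT (by name: the statement is the Claim_ definition above) =====
theorem solve_spec : Claim_equal_solve := by
  intro L R A _
  show solve L R A = solve_alt L R A
  unfold solve solve_alt
  split_ifs with h
  · exact odd_branch A
  · exact even_branch A
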